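-- pv_equiv track=rewrite | github.com/ColeBallard/twainsformation | controllers/routes.py | split_strings_evenly_by_paragraphs
-- ===== SOURCE A (Python) =====
-- def split_strings_evenly_by_paragraphs(original_strings):
--     new_list = []
--
--     for s in original_strings:
--         # Split the string into paragraphs
--         paragraphs = s.split('\n\n')
--
--         # Find the split point
--         split_point = len(paragraphs) // 2 + len(paragraphs) % 2  # Ensure first half is equal or larger
--
--         # Split the paragraphs into two halves
--         first_half = '\n\n'.join(paragraphs[:split_point])
--         second_half = '\n\n'.join(paragraphs[split_point:])
--
--         # Add the halves to the new list
--         new_list.extend([first_half, second_half])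
--
--     return new_list
-- ===== SOURCE B (Python) =====
-- def split_strings_evenly_by_paragraphs(original_strings):
--     new_list = []
--     for s in original_strings:
--         c = s.count('\n\n')
--         if c == 0:
--             new_list += [s, '']
--         else:
--             # ceil((c+1)/2) = c//2 + 1 paragraphs go to the first half; one
--             # bounded split yields the second half directly as its last piece,
--             # and the first half is the corresponding prefix of s.
--             tail = s.split('\n\n', c // 2 + 1)[-1]
--             new_list += [s[:len(s) - len(tail) - 2], tail]
--     return new_list
-- ===== Notes on version B (the rewrite author's own statement) =====
-- stated objective: alternative
-- what changed: Instead of splitting each string into a full paragraph list and rejoining both halves, B counts the '\n\n' separators, does one maxsplit-bounded split whose last piece is the second half verbatim, and takes the first half as a length-computed prefix slice of the original string, so no join is ever performed.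
import Mathlib
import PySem

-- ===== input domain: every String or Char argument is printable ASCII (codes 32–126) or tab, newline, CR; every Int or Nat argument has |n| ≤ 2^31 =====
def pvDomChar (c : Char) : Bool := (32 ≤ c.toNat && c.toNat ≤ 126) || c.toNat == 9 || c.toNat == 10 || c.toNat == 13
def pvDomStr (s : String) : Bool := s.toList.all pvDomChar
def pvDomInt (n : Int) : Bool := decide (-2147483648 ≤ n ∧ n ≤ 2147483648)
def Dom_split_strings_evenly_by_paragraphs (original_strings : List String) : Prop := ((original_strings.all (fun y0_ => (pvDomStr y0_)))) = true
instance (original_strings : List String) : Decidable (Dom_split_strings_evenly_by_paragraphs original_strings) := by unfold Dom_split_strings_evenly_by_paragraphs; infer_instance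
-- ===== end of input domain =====

-- B replaces split-all + two joins by a '\n\n' count, one maxsplit-bounded split whose
-- last piece is the second half, and a prefix slice of s for the first half (objective:
-- alternative: no paragraph list is built for the first half and no join is ever
-- performed; same asymptotic cost).

-- ===== PORT A =====
def split_strings_evenly_by_paragraphs (original_strings : List String) : List String :=
  original_strings.foldl (fun new_list s =>
    -- paragraphs = s.split('\n\n')   (sep ≠ "": Chars.splitOn is the exact form)
    let paragraphs : List String :=
      (PySem.Chars.splitOn s.toList "\n\n".toList).map String.ofList
    let split_point : Int :=
      PySem.Int.floordiv (paragraphs.length : Int) 2 + PySem.Int.mod (paragraphs.length : Int) 2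
    let first_half := PySem.Str.join "\n\n" (PySem.List.slice paragraphs none (some split_point))
    let second_half := PySem.Str.join "\n\n" (PySem.List.slice paragraphs (some split_point) none)
    new_list ++ [first_half, second_half]) []

-- ===== PORT B =====
def split_strings_evenly_by_paragraphs_alt (original_strings : List String) : List String :=
  original_strings.foldl (fun new_list s =>
    let c : Nat := PySem.Str.count s "\n\n"
    if c = 0 then new_list ++ [s, ""]
    else
      -- parts = s.split('\n\n', c // 2 + 1)   (sep ≠ "": Chars.splitOnMax is the exact form)
      let parts : List String :=
        (PySem.Chars.splitOnMax s.toList "\n\n".toList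
          (PySem.Int.floordiv (c : Int) 2 + 1)).map String.ofList
      -- parts[-1]; parts is never empty, so the IndexError default is unreachable
      let tail := (PySem.List.pyGet? parts (-1)).getD ""
      new_list ++
        [PySem.Str.slice s none (some (PySem.Str.len s - PySem.Str.len tail - 2)), tail]) []

-- ===== PRECONDITION & SPEC =====
def Spec_split_strings_evenly_by_paragraphs (original_strings : List String) (out : List String) : Prop := out = split_strings_evenly_by_paragraphs_alt original_strings
instance (original_strings : List String) (out : List String) : Decidable (Spec_split_strings_evenly_by_paragraphs original_strings out) := by unfold Spec_split_strings_evenly_by_paragraphs; infer_instance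

-- ===== CLAIM (what is proved, stated in full; the proofs are below) =====
def Claim_equal_split_strings_evenly_by_paragraphs : Prop := ∀ (original_strings : List String), Dom_split_strings_evenly_by_paragraphs original_strings → Spec_split_strings_evenly_by_paragraphs original_strings (split_strings_evenly_by_paragraphs original_strings)

-- ===== LEMMAS AND PROOFS =====

-- The separator '\n\n' as a character list.
def pvSep : List Char := ['\n', '\n']

-- Reference splitter: `pvSplit pre l` = the pieces of `pre ++ l` where splitting may
-- only happen inside `l` (mirrors the `cur`/rest state of PySem.Chars.splitOn.go).
def pvSplit (pre : List Char) : List Char → List (List Char)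
  | [] => [pre]
  | c :: rest =>
    if pvSep.isPrefixOf (c :: rest) then pre :: pvSplit [] (rest.drop 1)
    else pvSplit (pre ++ [c]) rest
termination_by l => l.length
decreasing_by
  all_goals simp

-- `pre` only prepends to the first piece.
lemma pvSplit_pre_aux : ∀ (fuel : Nat) (l : List Char), l.length ≤ fuel →
    ∃ h t, pvSplit [] l = h :: t ∧ ∀ pre, pvSplit pre l = (pre ++ h) :: t := by
  intro fuel
  induction fuel with
  | zero =>
      intro l hl
      have : l = [] := by cases l <;> simp_all
      subst this
      exact ⟨[], [], by simp [pvSplit], fun pre => by simp [pvSplit]⟩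
  | succ fuel ih =>
      intro l hl
      cases l with
      | nil => exact ⟨[], [], by simp [pvSplit], fun pre => by simp [pvSplit]⟩
      | cons c rest =>
          by_cases hp : pvSep.isPrefixOf (c :: rest) = true
          · exact ⟨[], pvSplit [] (rest.drop 1), by rw [pvSplit]; simp [hp],
              fun pre => by rw [pvSplit]; simp [hp]⟩
          · obtain ⟨h, t, h1, h2⟩ := ih rest (by simp at hl ⊢; omega)
            refine ⟨c :: h, t, ?_, fun pre => ?_⟩
            · rw [pvSplit]; simp [hp, h2]
            · rw [pvSplit]; simp [hp, h2]

lemma pvSplit_pre (l : List Char) :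
    ∃ h t, pvSplit [] l = h :: t ∧ ∀ pre, pvSplit pre l = (pre ++ h) :: t :=
  pvSplit_pre_aux l.length l le_rfl

lemma pvSplit_ne_nil (pre l : List Char) : pvSplit pre l ≠ [] := by
  obtain ⟨h, t, _, h2⟩ := pvSplit_pre l
  simp [h2]

lemma pvSplit_length_pre (pre l : List Char) :
    (pvSplit pre l).length = (pvSplit [] l).length := by
  obtain ⟨h, t, h1, h2⟩ := pvSplit_pre l
  simp [h1, h2]

-- join undoes the split.
lemma pvJoin_pvSplit_aux : ∀ (fuel : Nat) (l pre : List Char), l.length ≤ fuel →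
    PySem.Chars.join pvSep (pvSplit pre l) = pre ++ l := by
  intro fuel
  induction fuel with
  | zero =>
      intro l pre hl
      have : l = [] := by cases l <;> simp_all
      subst this
      simp [pvSplit, PySem.Chars.join_singleton]
  | succ fuel ih =>
      intro l pre hl
      cases l with
      | nil => simp [pvSplit, PySem.Chars.join_singleton]
      | cons c rest =>
          by_cases hp : pvSep.isPrefixOf (c :: rest) = true
          · cases rest with
            | nil => simp [pvSep, List.isPrefixOf] at hp
            | cons d rest' =>
                have hc : '\n' = c ∧ '\n' = d := by
                  simpa [pvSep, List.isPrefixOf] using hp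
                rw [pvSplit]
                simp only [hp, if_pos]
                have hrest : (d :: rest').drop 1 = rest' := by simp
                rw [hrest]
                obtain ⟨h', t', h1', _⟩ := pvSplit_pre rest'
                rw [h1', PySem.Chars.join_cons_cons]
                have hjoin := ih rest' [] (by simp at hl ⊢; omega)
                rw [h1'] at hjoin
                rw [hjoin]
                simp [← hc.1, ← hc.2, pvSep]
          · rw [pvSplit]
            simp only [hp, if_neg, Bool.false_eq_true, not_false_iff]
            have := ih rest (pre ++ [c]) (by simp at hl ⊢; omega)
            simp at this ⊢
            simp [this]

lemma pvJoin_pvSplit (pre l : List Char) :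
    PySem.Chars.join pvSep (pvSplit pre l) = pre ++ l :=
  pvJoin_pvSplit_aux l.length l pre le_rfl

-- join over a concatenation of two nonempty part-lists.
lemma pvJoin_append (X Y : List (List Char)) (hX : X ≠ []) (hY : Y ≠ []) :
    PySem.Chars.join pvSep (X ++ Y) =
      PySem.Chars.join pvSep X ++ pvSep ++ PySem.Chars.join pvSep Y := by
  induction X with
  | nil => simp at hX
  | cons a X ih =>
      cases X with
      | nil =>
          cases Y with
          | nil => simp at hY
          | cons b Y =>
              simp only [List.cons_append, List.nil_append]
              rw [PySem.Chars.join_cons_cons, PySem.Chars.join_singleton]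
      | cons a' X' =>
          have hstep : PySem.Chars.join pvSep (a :: a' :: X' ++ Y) =
              a ++ pvSep ++ PySem.Chars.join pvSep (a' :: X' ++ Y) := by
            cases X' <;> cases Y <;>
              simp [PySem.Chars.join_cons_cons, List.append_assoc]
          rw [hstep, ih (by simp)]
          simp [PySem.Chars.join_cons_cons, List.append_assoc]

-- The fuelled split loop computes pvSplit.
lemma pvSplitOn_go : ∀ (fuel : Nat) (l cur : List Char) (acc : List (List Char)),
    l.length ≤ fuel →
    PySem.Chars.splitOn.go pvSep fuel l cur acc = acc.reverse ++ pvSplit cur.reverse l := by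
  intro fuel
  induction fuel with
  | zero =>
      intro l cur acc hl
      have : l = [] := by cases l <;> simp_all
      subst this
      rw [PySem.Chars.splitOn.go.eq_def]
      simp [pvSplit]
  | succ fuel ih =>
      intro l cur acc hl
      cases l with
      | nil =>
          rw [PySem.Chars.splitOn.go.eq_def]
          simp [pvSplit]
      | cons c rest =>
          rw [PySem.Chars.splitOn.go.eq_def]
          by_cases hp : pvSep.isPrefixOf (c :: rest) = true
          · simp only [hp, if_pos]
            have hd : List.drop pvSep.length (c :: rest) = rest.drop 1 := by
              simp [pvSep]
            rw [hd, ih (rest.drop 1) [] (cur.reverse :: acc) (by simp at hl ⊢; omega)]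
            rw [pvSplit]
            simp [hp]
          · simp only [hp, if_neg, Bool.false_eq_true, not_false_iff]
            rw [ih rest (c :: cur) acc (by simp at hl ⊢; omega)]
            rw [pvSplit]
            simp [hp]

lemma pvSplitOn_eq (l : List Char) :
    PySem.Chars.splitOn l pvSep = pvSplit [] l := by
  rw [PySem.Chars.splitOn, pvSplitOn_go (l.length + 1) l [] [] (by omega)]
  simp

-- The fuelled count loop counts the pieces minus one.
lemma pvSplit_length_pos (pre l : List Char) : 0 < (pvSplit pre l).length := by
  cases h : pvSplit pre l with
  | nil => exact absurd h (pvSplit_ne_nil pre l)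
  | cons a t => simp

lemma pvCount_go : ∀ (fuel : Nat) (l : List Char) (acc : Nat), l.length ≤ fuel →
    PySem.Chars.count.go pvSep fuel l acc = acc + ((pvSplit [] l).length - 1) := by
  intro fuel
  induction fuel with
  | zero =>
      intro l acc hl
      have : l = [] := by cases l <;> simp_all
      subst this
      rw [PySem.Chars.count.go.eq_def]
      simp [pvSplit]
  | succ fuel ih =>
      intro l acc hl
      cases l with
      | nil =>
          rw [PySem.Chars.count.go.eq_def]
          simp [pvSplit]
      | cons c rest =>
          rw [PySem.Chars.count.go.eq_def]
          by_cases hp : pvSep.isPrefixOf (c :: rest) = true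
          · simp only [hp, if_pos]
            have hd : List.drop pvSep.length (c :: rest) = rest.drop 1 := by
              simp [pvSep]
            rw [hd, ih (rest.drop 1) (acc + 1) (by simp at hl ⊢; omega)]
            rw [pvSplit]
            simp only [hp, if_pos]
            have := pvSplit_length_pos [] (rest.drop 1)
            simp only [List.length_cons]
            omega
          · simp only [hp, if_neg, Bool.false_eq_true, not_false_iff]
            rw [ih rest acc (by simp at hl ⊢; omega)]
            rw [pvSplit]
            simp [hp, pvSplit_length_pre]

lemma pvCount_eq (l : List Char) :
    PySem.Chars.count l pvSep = (pvSplit [] l).length - 1 := by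
  rw [PySem.Chars.count, if_neg (by simp [pvSep]), pvCount_go l.length l 0 le_rfl]
  omega

-- The fuelled bounded split: first m pieces, then the rest rejoined.
lemma pvSplitOnMax_go : ∀ (fuel m : Nat) (l cur : List Char) (acc : List (List Char)),
    l.length ≤ fuel → m < (pvSplit cur.reverse l).length →
    PySem.Chars.splitOnMax.go pvSep fuel m l cur acc =
      acc.reverse ++ ((pvSplit cur.reverse l).take m ++
        [PySem.Chars.join pvSep ((pvSplit cur.reverse l).drop m)]) := by
  intro fuel
  induction fuel with
  | zero =>
      intro m l cur acc hf hm
      have : l = [] := by cases l <;> simp_all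
      subst this
      simp only [pvSplit] at hm ⊢
      have : m = 0 := by simpa using hm
      subst this
      rw [PySem.Chars.splitOnMax.go.eq_def]
      simp [PySem.Chars.join_singleton]
  | succ fuel ih =>
      intro m l cur acc hf hm
      cases l with
      | nil =>
          simp only [pvSplit] at hm ⊢
          have : m = 0 := by simpa using hm
          subst this
          rw [PySem.Chars.splitOnMax.go.eq_def]
          simp [PySem.Chars.join_singleton]
      | cons c rest =>
          rw [PySem.Chars.splitOnMax.go.eq_def]
          cases m with
          | zero =>
              simp only [if_true]
              simp [pvJoin_pvSplit cur.reverse (c :: rest)]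
          | succ m =>
              simp only [Nat.succ_ne_zero, if_neg, not_false_iff]
              by_cases hp : pvSep.isPrefixOf (c :: rest) = true
              · simp only [hp, if_pos]
                have hd : List.drop pvSep.length (c :: rest) = rest.drop 1 := by
                  simp [pvSep]
                have hsp : pvSplit cur.reverse (c :: rest) =
                    cur.reverse :: pvSplit [] (rest.drop 1) := by
                  rw [pvSplit]; simp [hp]
                rw [hsp] at hm
                simp only [List.length_cons] at hm
                have hm' : m < (pvSplit [] (rest.drop 1)).length := by omega
                have := ih m (rest.drop 1) [] (cur.reverse :: acc)
                  (by simp at hf ⊢; omega) (by simpa using hm')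
                rw [hd, Nat.add_sub_cancel, this, hsp]
                simp
              · simp only [hp, if_neg, Bool.false_eq_true, not_false_iff]
                have hsp : pvSplit cur.reverse (c :: rest) =
                    pvSplit (cur.reverse ++ [c]) rest := by
                  rw [pvSplit]; simp [hp]
                have hcur : (c :: cur).reverse = cur.reverse ++ [c] := by simp
                rw [ih (m + 1) rest (c :: cur) acc (by simp at hf ⊢; omega)
                  (by rw [hcur, ← hsp]; exact hm)]
                rw [hcur, ← hsp]

lemma pvSplitOnMax_eq (l : List Char) (m : Nat) (hm : m < (pvSplit [] l).length) :
    PySem.Chars.splitOnMax l pvSep (m : Int) =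
      (pvSplit [] l).take m ++ [PySem.Chars.join pvSep ((pvSplit [] l).drop m)] := by
  rw [PySem.Chars.splitOnMax]
  have h0 : ¬ ((m : Int) < 0) := by omega
  rw [if_neg h0]
  have := pvSplitOnMax_go (l.length + 1) (m : Int).toNat l [] [] (by omega)
    (by simpa using hm)
  simpa using this

lemma pvGet_last {α : Type} (xs : List α) (a : α) :
    PySem.List.pyGet? (xs ++ [a]) (-1) = some a := by
  simp [PySem.List.pyGet?, PySem.List.pyIdx?]

lemma pvStep_eq (new_list : List String) (s : String) :
    (let paragraphs : List String :=
      (PySem.Chars.splitOn s.toList "\n\n".toList).map String.ofList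
     let split_point : Int :=
      PySem.Int.floordiv (paragraphs.length : Int) 2 + PySem.Int.mod (paragraphs.length : Int) 2
     let first_half := PySem.Str.join "\n\n" (PySem.List.slice paragraphs none (some split_point))
     let second_half := PySem.Str.join "\n\n" (PySem.List.slice paragraphs (some split_point) none)
     new_list ++ [first_half, second_half]) =
    (let c : Nat := PySem.Str.count s "\n\n"
     if c = 0 then new_list ++ [s, ""]
     else
       let parts : List String :=
         (PySem.Chars.splitOnMax s.toList "\n\n".toList
           (PySem.Int.floordiv (c : Int) 2 + 1)).map String.ofList
       let tail := (PySem.List.pyGet? parts (-1)).getD ""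
       new_list ++
         [PySem.Str.slice s none (some (PySem.Str.len s - PySem.Str.len tail - 2)), tail]) := by
  have hsep : ("\n\n" : String).toList = pvSep := rfl
  have hjoinP := pvJoin_pvSplit [] s.toList
  simp only [List.nil_append] at hjoinP
  have hn1 := pvSplit_length_pos [] s.toList
  simp only [hsep, pvSplitOn_eq, PySem.Str.count, pvCount_eq, List.length_map]
  by_cases hone : (pvSplit [] s.toList).length = 1
  · rw [if_pos (by omega)]
    obtain ⟨h0, t0, hP0, _⟩ := pvSplit_pre s.toList
    have ht0 : t0 = [] := by
      rw [hP0] at hone; simpa using hone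
    subst ht0
    have hh0 : h0 = s.toList := by
      rw [hP0, PySem.Chars.join_singleton] at hjoinP
      exact hjoinP
    subst hh0
    rw [hP0]
    simp only [List.length_cons, List.length_nil, Nat.zero_add, Nat.cast_one]
    rw [show PySem.Int.floordiv (1 : Int) 2 + PySem.Int.mod (1 : Int) 2 = 1 from by decide]
    rw [PySem.List.slice_to _ (by norm_num), PySem.List.slice_from _ (by norm_num)]
    simp [PySem.Str.join, PySem.Chars.join_singleton, PySem.Chars.join_nil,
      String.ofList_toList]
  · have hne : ¬ ((pvSplit [] s.toList).length - 1 = 0) := by omega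
    rw [if_neg hne]
    obtain ⟨n, hn⟩ : ∃ n, (pvSplit [] s.toList).length = n := ⟨_, rfl⟩
    have hn2 : 2 ≤ n := by omega
    have hklt : n / 2 + n % 2 < n := by omega
    have hk1 : 1 ≤ n / 2 + n % 2 := by omega
    rw [hn]
    have hm1 : PySem.Int.floordiv ((n - 1 : Nat) : Int) 2 + 1 =
        ((n / 2 + n % 2 : Nat) : Int) := by
      rw [show (2 : Int) = ((2 : Nat) : Int) from rfl, PySem.Int.floordiv_natCast]
      omega
    have hm2 : PySem.Int.floordiv ((n : Nat) : Int) 2 + PySem.Int.mod ((n : Nat) : Int) 2 =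
        ((n / 2 + n % 2 : Nat) : Int) := by
      rw [show (2 : Int) = ((2 : Nat) : Int) from rfl, PySem.Int.floordiv_natCast,
        PySem.Int.mod_natCast]
      omega
    rw [hm1, hm2]
    rw [pvSplitOnMax_eq s.toList (n / 2 + n % 2) (by omega)]
    simp only [List.map_append, List.map_cons, List.map_nil]
    rw [pvGet_last, Option.getD_some]
    have htake_ne : (pvSplit [] s.toList).take (n / 2 + n % 2) ≠ [] := by
      apply List.ne_nil_of_length_pos
      simp [hn]; omega
    have hdrop_ne : (pvSplit [] s.toList).drop (n / 2 + n % 2) ≠ [] := by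
      apply List.ne_nil_of_length_pos
      simp [hn]; omega
    have hsF : s.toList =
        PySem.Chars.join pvSep ((pvSplit [] s.toList).take (n / 2 + n % 2)) ++ pvSep ++
          PySem.Chars.join pvSep ((pvSplit [] s.toList).drop (n / 2 + n % 2)) := by
      rw [← pvJoin_append _ _ htake_ne hdrop_ne, List.take_append_drop]
      exact hjoinP.symm
    set F := PySem.Chars.join pvSep ((pvSplit [] s.toList).take (n / 2 + n % 2)) with hF
    set J := PySem.Chars.join pvSep ((pvSplit [] s.toList).drop (n / 2 + n % 2)) with hJ
    have hlen : s.toList.length = F.length + 2 + J.length := by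
      rw [hsF]; simp [pvSep]; omega
    have hb : PySem.Str.len s - PySem.Str.len (String.ofList J) - 2 =
        ((F.length : Nat) : Int) := by
      simp only [PySem.Str.len, String.toList_ofList, hlen]
      push_cast
      ring
    have hslice : PySem.Str.slice s none (some ((F.length : Nat) : Int)) =
        String.ofList F := by
      rw [PySem.Str.slice]
      congr 1
      simp only [PySem.Chars.slice_eq_listSlice]
      rw [PySem.List.slice_to _ (Int.natCast_nonneg _), Int.toNat_natCast]
      rw [hsF, List.append_assoc, List.take_left]
    have hA1 : PySem.List.slice ((pvSplit [] s.toList).map String.ofList) none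
        (some ((n / 2 + n % 2 : Nat) : Int)) =
        ((pvSplit [] s.toList).take (n / 2 + n % 2)).map String.ofList := by
      rw [PySem.List.slice_to _ (Int.natCast_nonneg _), Int.toNat_natCast, List.map_take]
    have hA2 : PySem.List.slice ((pvSplit [] s.toList).map String.ofList)
        (some ((n / 2 + n % 2 : Nat) : Int)) none =
        ((pvSplit [] s.toList).drop (n / 2 + n % 2)).map String.ofList := by
      rw [PySem.List.slice_from _ (Int.natCast_nonneg _), Int.toNat_natCast, List.map_drop]
    have hjoin1 : PySem.Str.join "\n\n"
        (((pvSplit [] s.toList).take (n / 2 + n % 2)).map String.ofList) =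
        String.ofList F := by
      rw [PySem.Str.join, hsep, hF]
      congr 1
      simp [List.map_map, Function.comp_def]
    have hjoin2 : PySem.Str.join "\n\n"
        (((pvSplit [] s.toList).drop (n / 2 + n % 2)).map String.ofList) =
        String.ofList J := by
      rw [PySem.Str.join, hsep, hJ]
      congr 1
      simp [List.map_map, Function.comp_def]
    rw [hA1, hA2, hjoin1, hjoin2, hb, hslice]



-- ===== VERDICT (by name: the statement is the Claim_ definition above) =====
theorem split_strings_evenly_by_paragraphs_spec : Claim_equal_split_strings_evenly_by_paragraphs := by
  intro original_strings hdom
  clear hdom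
  unfold Spec_split_strings_evenly_by_paragraphs
  unfold split_strings_evenly_by_paragraphs split_strings_evenly_by_paragraphs_alt
  induction original_strings using List.reverseRecOn with
  | nil => rfl
  | append_singleton xs x ih =>
      rw [List.foldl_append, List.foldl_append,
        List.foldl_cons, List.foldl_cons, List.foldl_nil, List.foldl_nil, ← ih]
      exact pvStep_eq _ x
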